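-- pv_equiv track=rewrite | github.com/LagaV/brother_ql_web | app/labeldesigner/markdown_processor.py | find_previous_boundary
-- ===== SOURCE A (Python) =====
-- from typing import List, Optional, Dict, Tuple
--
-- def find_previous_boundary(row_blank: List[bool],
--                            row_heavy: Optional[List[bool]],
--                            approx_y: int,
--                            lower_bound: int,
--                            min_blank_run: int) -> Optional[int]:
--     if approx_y <= lower_bound:
--         return None
--
--     best: Optional[int] = None
--     min_blank_run = max(1, min_blank_run)
--
--     for y in range(approx_y - 1, lower_bound - 1, -1):
--         if row_heavy is not None and y < len(row_heavy) and row_heavy[y]: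
--             return min(len(row_blank), y + 1)
--
--         start = max(lower_bound, y - min_blank_run + 1)
--         all_blank = True
--         for k in range(start, y + 1):
--             if k >= len(row_blank) or not row_blank[k]:
--                 all_blank = False
--                 break
--         if all_blank:
--             best = y + 1
--             break
--
--     return best
-- ===== SOURCE B (Python) =====
-- from typing import List, Optional
--
-- def find_previous_boundary(row_blank: List[bool],
--                            row_heavy: Optional[List[bool]],
--                            approx_y: int,
--                            lower_bound: int,
--                            min_blank_run: int) -> Optional[int]:
--     if approx_y <= lower_bound:
--         return None
--
--     mbr = max(1, min_blank_run)
--     n = len(row_blank)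
--
--     # prefix sums of non-blank rows: pref[m] = number of non-blank rows among the first m
--     pref = [0] * (n + 1)
--     for i in range(n):
--         pref[i + 1] = pref[i] + (0 if row_blank[i] else 1)
--
--     heavy = row_heavy if row_heavy is not None else []
--     hn = len(heavy)
--
--     y = approx_y - 1
--     while y >= lower_bound:
--         if 0 <= y < hn and heavy[y]:
--             return min(n, y + 1)
--         start = max(lower_bound, y - mbr + 1)
--         if 0 <= start and y < n and pref[y + 1] - pref[start] == 0:
--             return y + 1
--         y -= 1
--     return None
-- ===== Notes on version B (the rewrite author's own statement) =====
-- stated objective: alternative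
-- what changed: Replaces the per-candidate-row inner rescan of the blank window by a prefix-sum array of non-blank counts built once, so each window is tested with one subtraction instead of a scan.
-- outside the precondition, e.g. on find_previous_boundary([False, True], None, 1, -1, 2): A returns 0, B returns None; on find_previous_boundary([], None, 1, -2, 1): A raises IndexError, B returns None
import Mathlib
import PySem

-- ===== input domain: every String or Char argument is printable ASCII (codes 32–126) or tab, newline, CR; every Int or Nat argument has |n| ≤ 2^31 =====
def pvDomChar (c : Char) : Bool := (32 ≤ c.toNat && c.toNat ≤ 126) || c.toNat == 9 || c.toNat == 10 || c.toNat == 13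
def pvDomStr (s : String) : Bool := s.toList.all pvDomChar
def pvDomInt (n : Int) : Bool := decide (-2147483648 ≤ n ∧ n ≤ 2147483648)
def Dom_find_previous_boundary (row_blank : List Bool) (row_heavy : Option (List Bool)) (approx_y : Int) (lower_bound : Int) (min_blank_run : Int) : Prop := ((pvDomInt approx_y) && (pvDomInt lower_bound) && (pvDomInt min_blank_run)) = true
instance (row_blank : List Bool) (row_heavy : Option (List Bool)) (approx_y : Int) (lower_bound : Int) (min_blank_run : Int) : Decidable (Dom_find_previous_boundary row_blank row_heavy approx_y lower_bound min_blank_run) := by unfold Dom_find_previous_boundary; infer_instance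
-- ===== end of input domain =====

-- B replaces A's per-row rescan of the blank window by a prefix-sum array of non-blank
-- counts built once, so each window is tested with one subtraction (alternative algorithm).

-- ===== PORT A =====
-- inner loop: for k in range(start, y+1): if k >= len(row_blank) or not row_blank[k]: all_blank = False; break
def pvAllBlankA (row_blank : List Bool) (k stop : Int) : Bool :=
  if _h : stop ≤ k then true
  else if decide ((row_blank.length : Int) ≤ k) || !((PySem.List.pyGet? row_blank k).getD false) then false
  else pvAllBlankA row_blank (k + 1) stop
termination_by (stop - k).toNat
decreasing_by omega

-- outer loop: for y in range(approx_y - 1, lower_bound - 1, -1), with its two early returns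
def pvLoopA (row_blank : List Bool) (row_heavy : Option (List Bool)) (lower_bound min_blank_run y : Int) : Option Int :=
  if _h : y < lower_bound then none
  else if (match row_heavy with
           | some h => decide (y < (h.length : Int)) && (PySem.List.pyGet? h y).getD false
           | none => false) then
    some (min (row_blank.length : Int) (y + 1))
  else if pvAllBlankA row_blank (max lower_bound (y - min_blank_run + 1)) (y + 1) then
    some (y + 1)
  else pvLoopA row_blank row_heavy lower_bound min_blank_run (y - 1)
termination_by (y - lower_bound + 1).toNat
decreasing_by omega

def find_previous_boundary (row_blank : List Bool) (row_heavy : Option (List Bool)) (approx_y : Int) (lower_bound : Int) (min_blank_run : Int) : Option Int :=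
  if approx_y ≤ lower_bound then none
  else pvLoopA row_blank row_heavy lower_bound (max 1 min_blank_run) (approx_y - 1)

-- ===== PORT B =====
-- prefix sums of non-blank rows: pref[m] = number of non-blank rows among the first m
def pvPrefB (acc : Int) : List Bool → List Int
  | [] => [acc]
  | b :: bs => acc :: pvPrefB (acc + (if b then 0 else 1)) bs

-- the while loop of B: window tested with one prefix-sum subtraction
def pvLoopB (row_blank : List Bool) (pref : List Int) (heavy : List Bool) (lower_bound mbr y : Int) : Option Int :=
  if _h : y < lower_bound then none
  else if decide (0 ≤ y) && decide (y < (heavy.length : Int)) && heavy.getD y.toNat false then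
    some (min (row_blank.length : Int) (y + 1))
  else
    let start := max lower_bound (y - mbr + 1)
    if decide (0 ≤ start) && decide (y < (row_blank.length : Int)) &&
       decide (pref.getD (y + 1).toNat 0 - pref.getD start.toNat 0 = 0) then
      some (y + 1)
    else pvLoopB row_blank pref heavy lower_bound mbr (y - 1)
termination_by (y - lower_bound + 1).toNat
decreasing_by omega

def find_previous_boundary_alt (row_blank : List Bool) (row_heavy : Option (List Bool)) (approx_y : Int) (lower_bound : Int) (min_blank_run : Int) : Option Int :=
  if approx_y ≤ lower_bound then none
  else pvLoopB row_blank (pvPrefB 0 row_blank) (row_heavy.getD []) lower_bound (max 1 min_blank_run) (approx_y - 1)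

-- ===== PRECONDITION & SPEC =====
-- Pre_ restricts to the natural domain of non-negative row bounds: with a negative
-- lower_bound A's loop probes rows at negative indices, where it either raises
-- IndexError (below -len) or returns values produced by Python's negative-index
-- wraparound, an artefact of the implementation; B treats only real rows there.
def Pre_find_previous_boundary (row_blank : List Bool) (row_heavy : Option (List Bool)) (approx_y : Int) (lower_bound : Int) (min_blank_run : Int) : Prop := 0 ≤ lower_bound
instance (row_blank : List Bool) (row_heavy : Option (List Bool)) (approx_y : Int) (lower_bound : Int) (min_blank_run : Int) : Decidable (Pre_find_previous_boundary row_blank row_heavy approx_y lower_bound min_blank_run) := by unfold Pre_find_previous_boundary; infer_instance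

def pvWitness_find_previous_boundary : List Bool × Option (List Bool) × Int × Int × Int := ([true, false, true], some [false, false, false], 3, 0, 1)

def Spec_find_previous_boundary (row_blank : List Bool) (row_heavy : Option (List Bool)) (approx_y : Int) (lower_bound : Int) (min_blank_run : Int) (out : Option Int) : Prop := out = find_previous_boundary_alt row_blank row_heavy approx_y lower_bound min_blank_run
instance (row_blank : List Bool) (row_heavy : Option (List Bool)) (approx_y : Int) (lower_bound : Int) (min_blank_run : Int) (out : Option Int) : Decidable (Spec_find_previous_boundary row_blank row_heavy approx_y lower_bound min_blank_run out) := by unfold Spec_find_previous_boundary; infer_instance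

-- ===== CLAIM (what is proved, stated in full; the proofs are below) =====
def Claim_equal_find_previous_boundary : Prop := ∀ (row_blank : List Bool) (row_heavy : Option (List Bool)) (approx_y : Int) (lower_bound : Int) (min_blank_run : Int), Dom_find_previous_boundary row_blank row_heavy approx_y lower_bound min_blank_run → Pre_find_previous_boundary row_blank row_heavy approx_y lower_bound min_blank_run → Spec_find_previous_boundary row_blank row_heavy approx_y lower_bound min_blank_run (find_previous_boundary row_blank row_heavy approx_y lower_bound min_blank_run)

-- ===== LEMMAS AND PROOFS =====

-- pyGet? with a non-negative index, defaulted, is List.getD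
lemma pv_pyGet_getD (l : List Bool) (k : Int) (hk : 0 ≤ k) :
    (PySem.List.pyGet? l k).getD false = l.getD k.toNat false := by
  rw [PySem.List.pyGet?_of_nonneg l hk]
  simp [List.getD]

-- characterisation of A's inner scan
lemma pv_allBlankA_iff (rb : List Bool) : ∀ (s t : Int), 0 ≤ s →
    (pvAllBlankA rb s t = true ↔
      ∀ k : Int, s ≤ k → k < t → k < (rb.length : Int) ∧ rb.getD k.toNat false = true) := by
  intro s t hs
  generalize hfuel : (t - s).toNat = fuel
  induction fuel generalizing s with
  | zero =>
    rw [pvAllBlankA]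
    have hts : t ≤ s := by omega
    simp only [dif_pos hts]
    constructor
    · intro _ k hk1 hk2; omega
    · intro _; trivial
  | succ n ih =>
    rw [pvAllBlankA]
    have hst : ¬ t ≤ s := by omega
    simp only [dif_neg hst]
    by_cases hbad : (decide ((rb.length : Int) ≤ s) || !((PySem.List.pyGet? rb s).getD false)) = true
    · rw [if_pos hbad]
      simp only [Bool.or_eq_true, decide_eq_true_eq, Bool.not_eq_eq_eq_not, Bool.not_true] at hbad
      constructor
      · intro h; exact absurd h (by simp)
      · intro h
        have := h s le_rfl (by omega)
        rcases hbad with hb | hb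
        · omega
        · rw [pv_pyGet_getD rb s hs] at hb
          rw [this.2] at hb; simp at hb
    · rw [if_neg hbad]
      simp only [Bool.or_eq_true, decide_eq_true_eq, Bool.not_eq_eq_eq_not, Bool.not_true,
        not_or] at hbad
      obtain ⟨hlen, hget⟩ := hbad
      rw [pv_pyGet_getD rb s hs] at hget
      push_neg at hlen hget
      rw [ih (s + 1) (by omega) (by omega)]
      constructor
      · intro h k hk1 hk2
        rcases eq_or_lt_of_le hk1 with rfl | hlt
        · exact ⟨by omega, by simpa using hget⟩
        · exact h k (by omega) hk2
      · intro h k hk1 hk2; exact h k (by omega) hk2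

-- the prefix list computes counts of non-blank rows
lemma pv_prefB_getD (l : List Bool) : ∀ (a : Int) (m : Nat), m ≤ l.length →
    (pvPrefB a l).getD m 0 = a + ((l.take m).countP (fun b => !b) : Int) := by
  induction l with
  | nil =>
    intro a m hm
    simp only [List.length_nil, Nat.le_zero] at hm; subst hm
    simp [pvPrefB]
  | cons b bs ih =>
    intro a m hm
    cases m with
    | zero => simp [pvPrefB]
    | succ m =>
      simp only [pvPrefB, List.getD_cons_succ, List.take_succ_cons, List.countP_cons]
      rw [ih _ m (by simpa using hm)]
      by_cases hb : b <;> simp [hb] <;> push_cast <;> ring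

-- a prefix-sum difference of zero means the segment is all blank
lemma pv_prefDiff_iff (rb : List Bool) (s t : Nat) (hst : s ≤ t) (ht : t ≤ rb.length) :
    ((pvPrefB 0 rb).getD t 0 - (pvPrefB 0 rb).getD s 0 = 0 ↔
      ∀ k : Nat, s ≤ k → k < t → rb.getD k false = true) := by
  rw [pv_prefB_getD rb 0 t ht, pv_prefB_getD rb 0 s (le_trans hst ht)]
  have hsplit : rb.take t = rb.take s ++ (rb.take t).drop s := by
    conv_lhs => rw [← List.take_append_drop s (rb.take t)]
    rw [List.take_take, Nat.min_eq_left hst]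
  rw [hsplit, List.countP_append]
  have hlen : ((rb.take t).drop s).length = t - s := by
    simp [Nat.min_eq_left ht]
  constructor
  · intro h k hk1 hk2
    have hz : ((rb.take t).drop s).countP (fun b => !b) = 0 := by omega
    rw [List.countP_eq_zero] at hz
    have hkk : k < rb.length := lt_of_lt_of_le hk2 ht
    have hmem : rb[k] ∈ (rb.take t).drop s := by
      have : ((rb.take t).drop s)[k - s]'(by omega) = rb[k] := by
        simp [List.getElem_drop, List.getElem_take]
        congr 1; omega
      rw [← this]; exact List.getElem_mem _
    have := hz _ hmem
    simp only [Bool.not_eq_eq_eq_not, Bool.not_true] at this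
    simp [List.getD_eq_getElem?_getD, List.getElem?_eq_getElem hkk]
    simpa using this
  · intro h
    have hz : ((rb.take t).drop s).countP (fun b => !b) = 0 := by
      rw [List.countP_eq_zero]
      intro b hb
      rw [List.mem_iff_getElem] at hb
      obtain ⟨i, hi, hbi⟩ := hb
      have hi' : i < t - s := by omega
      have : ((rb.take t).drop s)[i]'hi = rb[s + i]'(by omega) := by
        simp [List.getElem_drop, List.getElem_take]
      rw [this] at hbi
      have := h (s + i) (by omega) (by omega)
      rw [List.getD_eq_getElem?_getD, List.getElem?_eq_getElem (by omega : s + i < rb.length)] at this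
      simp only [Option.getD_some] at this
      rw [← hbi, this]; simp
    omega

-- the two window tests agree when the window is a real non-empty one
lemma pv_blank_eq (rb : List Bool) (lb m y : Int) (hlb : 0 ≤ lb) (hm : 1 ≤ m) (hy : lb ≤ y) :
    pvAllBlankA rb (max lb (y - m + 1)) (y + 1) =
      (decide (0 ≤ max lb (y - m + 1)) && decide (y < (rb.length : Int)) &&
        decide ((pvPrefB 0 rb).getD (y + 1).toNat 0 - (pvPrefB 0 rb).getD (max lb (y - m + 1)).toNat 0 = 0)) := by
  set s := max lb (y - m + 1) with hsdef
  have hs0 : 0 ≤ s := le_trans hlb (le_max_left _ _)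
  have hsy : s ≤ y := by omega
  rw [Bool.eq_iff_iff]
  rw [pv_allBlankA_iff rb s (y + 1) hs0]
  simp only [Bool.and_eq_true, decide_eq_true_eq]
  constructor
  · intro h
    have hyn := (h y hsy (by omega)).1
    refine ⟨⟨hs0, hyn⟩, ?_⟩
    apply (pv_prefDiff_iff rb s.toNat (y + 1).toNat (by omega) (by omega)).2
    intro k hk1 hk2
    simpa using (h (k : Int) (by omega) (by omega)).2
  · rintro ⟨⟨-, hyn⟩, hdiff⟩ k hk1 hk2
    refine ⟨by omega, ?_⟩
    exact (pv_prefDiff_iff rb s.toNat (y + 1).toNat (by omega) (by omega)).1 hdiff k.toNat (by omega) (by omega)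

-- the two heavy-row tests agree for non-negative y
lemma pv_heavy_eq (rh : Option (List Bool)) (y : Int) (hy : 0 ≤ y) :
    (match rh with
      | some h => decide (y < (h.length : Int)) && (PySem.List.pyGet? h y).getD false
      | none => false) =
    (decide (0 ≤ y) && decide (y < ((rh.getD []).length : Int)) && (rh.getD []).getD y.toNat false) := by
  cases rh with
  | none => simp
  | some h =>
    simp only [Option.getD_some]
    rw [pv_pyGet_getD h y hy]
    by_cases hlt : y < (h.length : Int) <;> simp [hlt, hy, Bool.and_assoc]

-- the two loops agree step by step
lemma pv_loop_eq (rb : List Bool) (rh : Option (List Bool)) (lb m : Int)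
    (hlb : 0 ≤ lb) (hm : 1 ≤ m) (y : Int) :
    pvLoopA rb rh lb m y = pvLoopB rb (pvPrefB 0 rb) (rh.getD []) lb m y := by
  generalize hfuel : (y - lb + 1).toNat = fuel
  induction fuel generalizing y with
  | zero =>
    rw [pvLoopA.eq_def, pvLoopB.eq_def]
    have : y < lb := by omega
    simp [this]
  | succ n ih =>
    rw [pvLoopA.eq_def, pvLoopB.eq_def]
    by_cases hylb : y < lb
    · simp [hylb]
    · simp only [dif_neg hylb]
      rw [pv_heavy_eq rh y (by omega)]
      rw [pv_blank_eq rb lb m y hlb hm (by omega)]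
      split
      · rfl
      · split
        · rfl
        · exact ih (y - 1) (by omega)

-- ===== VERDICT (by name: the statement is the Claim_ definition above) =====
theorem find_previous_boundary_spec : Claim_equal_find_previous_boundary := by
  intro rb rh ay lb mbr _hdom hpre
  unfold Spec_find_previous_boundary find_previous_boundary find_previous_boundary_alt
  by_cases h : ay ≤ lb
  · simp [h]
  · simp only [if_neg h]
    exact pv_loop_eq rb rh lb (max 1 mbr) hpre (le_max_left _ _) (ay - 1)
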